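-- pv_equiv track=rewrite | github.com/fzinnah17/codepath-weekly-assignments-TIP-102-4b | unit3-session1-2.py | time_to_complete_dream_designs
-- ===== SOURCE A (Python) =====
-- def time_to_complete_dream_designs(design_times):
--     n = len(design_times)
--     ans = [0] * n
--     stack = []  # indices
--
--     for i, t in enumerate(design_times):
--         while stack and t > design_times[stack[-1]]:
--             idx = stack.pop()
--             ans[idx] = i - idx
--         stack.append(i)
--     return ans
-- ===== SOURCE B (Python) =====
-- def time_to_complete_dream_designs(design_times):
--     n = len(design_times)
--
--     def first_gap(i):
--         for j in range(i + 1, n):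
--             if design_times[j] > design_times[i]:
--                 return j - i
--         return 0
--
--     return [first_gap(i) for i in range(n)]
-- ===== Notes on version B (the rewrite author's own statement) =====
-- stated objective: simpler
-- what changed: Replaced the monotonic index stack and in-place answer updates by a direct forward scan: each position independently looks for the first strictly greater later element.
import Mathlib
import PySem

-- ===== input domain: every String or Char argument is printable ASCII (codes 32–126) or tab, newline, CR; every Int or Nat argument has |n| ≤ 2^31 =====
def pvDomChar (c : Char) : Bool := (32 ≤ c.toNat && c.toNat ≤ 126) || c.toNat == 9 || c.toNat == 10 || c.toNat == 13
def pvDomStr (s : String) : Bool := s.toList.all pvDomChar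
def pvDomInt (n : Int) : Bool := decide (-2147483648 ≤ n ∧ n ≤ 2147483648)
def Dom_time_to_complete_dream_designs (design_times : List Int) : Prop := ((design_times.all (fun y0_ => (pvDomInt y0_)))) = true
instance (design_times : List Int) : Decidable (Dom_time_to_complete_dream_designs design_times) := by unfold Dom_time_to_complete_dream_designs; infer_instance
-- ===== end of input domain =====

-- B replaces A's monotonic index stack by a plain independent forward scan per position (simpler; O(n^2) vs A's O(n)).

-- ===== PORT A =====
-- the inner `while stack and t > design_times[stack[-1]]` loop; the stack holds
-- indices (top first), all provably in range, so `design_times[stack[-1]]` is `getD`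
def popLoop (a : List Int) (t : Int) (i : Nat) : List Nat → List Int → List Nat × List Int
  | [], ans => ([], ans)
  | idx :: rest, ans =>
    if t > a.getD idx 0 then
      popLoop a t i rest (ans.set idx ((i : Int) - (idx : Int)))
    else (idx :: rest, ans)

-- body of `for i, t in enumerate(design_times)`
def stepA (a : List Int) (st : List Nat × List Int) (i : Nat) : List Nat × List Int :=
  let t := a.getD i 0
  let p := popLoop a t i st.1 st.2
  (i :: p.1, p.2)

def time_to_complete_dream_designs (design_times : List Int) : List Int :=
  let n := design_times.length
  ((List.range n).foldl (stepA design_times) ([], List.replicate n 0)).2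

-- ===== PORT B =====
-- `first_gap(i)`: scan j = i+1 .. n-1 for the first strictly greater element
def firstGapAux (a : List Int) (i : Nat) : List Nat → Int
  | [] => 0
  | j :: js => if a.getD j 0 > a.getD i 0 then (j : Int) - (i : Int) else firstGapAux a i js

def time_to_complete_dream_designs_alt (design_times : List Int) : List Int :=
  let n := design_times.length
  (List.range n).map (fun i => firstGapAux design_times i (List.range' (i + 1) (n - (i + 1))))

-- ===== PRECONDITION & SPEC =====
def Spec_time_to_complete_dream_designs (design_times : List Int) (out : List Int) : Prop := out = time_to_complete_dream_designs_alt design_times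
instance (design_times : List Int) (out : List Int) : Decidable (Spec_time_to_complete_dream_designs design_times out) := by unfold Spec_time_to_complete_dream_designs; infer_instance

-- ===== CLAIM (what is proved, stated in full; the proofs are below) =====
def Claim_equal_time_to_complete_dream_designs : Prop := ∀ (design_times : List Int), Dom_time_to_complete_dream_designs design_times → Spec_time_to_complete_dream_designs design_times (time_to_complete_dream_designs design_times)

-- ===== LEMMAS AND PROOFS =====

-- j "survives" the prefix of length m: no strictly greater element after j within the prefix
def keepB (a : List Int) (m j : Nat) : Bool :=
  (List.range' (j + 1) (m - (j + 1))).all (fun k => decide (a.getD k 0 ≤ a.getD j 0))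

-- the answer recorded for position j after processing the prefix of length m
def ansVal (a : List Int) (m j : Nat) : Int :=
  match (List.range' (j + 1) (m - (j + 1))).find? (fun k => decide (a.getD k 0 > a.getD j 0)) with
  | some k => (k : Int) - (j : Int)
  | none => 0

theorem keepB_iff (a : List Int) {m j : Nat} (hj : j < m) :
    keepB a m j = true ↔ ∀ k, j < k → k < m → a.getD k 0 ≤ a.getD j 0 := by
  unfold keepB
  rw [List.all_eq_true]
  constructor
  · intro h k hk1 hk2
    have := h k (by rw [List.mem_range'_1]; omega)
    simpa using this
  · intro h k hk
    rw [List.mem_range'_1] at hk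
    simpa using h k (by omega) (by omega)

theorem popLoop_stack (a : List Int) (t : Int) (i : Nat) :
    ∀ (s : List Nat) (ans : List Int),
      s.Pairwise (· > ·) →
      (∀ j ∈ s, ∀ j' ∈ s, j' < j → a.getD j 0 ≤ a.getD j' 0) →
      (popLoop a t i s ans).1 = s.filter (fun j => !decide (t > a.getD j 0)) := by
  intro s
  induction s with
  | nil => intro ans _ _; simp [popLoop]
  | cons j0 rest ih =>
    intro ans hp hm
    simp only [popLoop]
    by_cases h : t > a.getD j0 0
    · rw [if_pos h,
        ih _ hp.of_cons (fun j hj j' hj' => hm j (by simp [hj]) j' (by simp [hj'])),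
        List.filter_cons_of_neg (by simpa using h)]
    · rw [if_neg h]
      symm
      rw [List.filter_eq_self]
      intro j hj
      simp only [List.mem_cons] at hj
      rcases hj with rfl | hj
      · simp only [Bool.not_eq_true', decide_eq_false_iff_not]
        omega
      · have hlt : j < j0 := (List.pairwise_cons.mp hp).1 j hj
        have := hm j0 (by simp) j (by simp [hj]) hlt
        simp only [Bool.not_eq_true', decide_eq_false_iff_not]
        omega

theorem popLoop_len (a : List Int) (t : Int) (i : Nat) :
    ∀ (s : List Nat) (ans : List Int), (popLoop a t i s ans).2.length = ans.length := by
  intro s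
  induction s with
  | nil => intro ans; simp [popLoop]
  | cons j0 rest ih =>
    intro ans
    simp only [popLoop]
    by_cases h : t > a.getD j0 0
    · rw [if_pos h, ih]; simp
    · rw [if_neg h]

theorem getD_set_eq (ans : List Int) (j0 : Nat) (v : Int) (h : j0 < ans.length) :
    (ans.set j0 v).getD j0 0 = v := by
  rw [List.getD_eq_getElem _ _ (by simpa using h), List.getElem_set]
  simp

theorem getD_set_ne (ans : List Int) (j0 j : Nat) (v : Int) (h : j0 ≠ j) :
    (ans.set j0 v).getD j 0 = ans.getD j 0 := by
  by_cases hj : j < ans.length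
  · rw [List.getD_eq_getElem _ _ (by simpa using hj), List.getD_eq_getElem _ _ hj,
      List.getElem_set, if_neg h]
  · rw [List.getD_eq_default _ _ (by simpa using not_lt.mp hj),
      List.getD_eq_default _ _ (not_lt.mp hj)]

theorem popLoop_ans (a : List Int) (t : Int) (i : Nat) :
    ∀ (s : List Nat) (ans : List Int),
      s.Pairwise (· > ·) →
      (∀ j ∈ s, ∀ j' ∈ s, j' < j → a.getD j 0 ≤ a.getD j' 0) →
      (∀ j ∈ s, j < ans.length) →
      ∀ j, (popLoop a t i s ans).2.getD j 0 =
        if j ∈ s ∧ t > a.getD j 0 then (i : Int) - (j : Int) else ans.getD j 0 := by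
  intro s
  induction s with
  | nil => intro ans _ _ _ j; simp [popLoop]
  | cons j0 rest ih =>
    intro ans hp hm hlen j
    simp only [popLoop]
    by_cases h : t > a.getD j0 0
    · rw [if_pos h,
        ih _ hp.of_cons (fun x hx y hy => hm x (by simp [hx]) y (by simp [hy]))
          (fun x hx => by rw [List.length_set]; exact hlen x (by simp [hx]))]
      by_cases hj : j = j0
      · subst hj
        have hnr : j ∉ rest := by
          intro hr
          exact absurd ((List.pairwise_cons.mp hp).1 j hr) (lt_irrefl j)
        rw [if_neg (fun hc => hnr hc.1), getD_set_eq _ _ _ (hlen j (by simp)),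
          if_pos ⟨by simp, h⟩]
      · rw [getD_set_ne _ _ _ _ (Ne.symm hj)]
        by_cases hjr : j ∈ rest ∧ t > a.getD j 0
        · rw [if_pos hjr, if_pos ⟨by simp [hjr.1], hjr.2⟩]
        · rw [if_neg hjr, if_neg (by simp only [List.mem_cons]; tauto)]
    · rw [if_neg h, if_neg]
      rintro ⟨hjs, hjt⟩
      simp only [List.mem_cons] at hjs
      rcases hjs with rfl | hjs
      · exact h hjt
      · have hlt : j < j0 := (List.pairwise_cons.mp hp).1 j hjs
        have := hm j0 (by simp) j (by simp [hjs]) hlt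
        omega

-- the invariant of the main loop after processing the prefix of length m
theorem mainInv (a : List Int) :
    ∀ m, m ≤ a.length →
      ((List.range m).foldl (stepA a) ([], List.replicate a.length 0)).1
        = ((List.range m).filter (keepB a m)).reverse ∧
      ((List.range m).foldl (stepA a) ([], List.replicate a.length 0)).2.length = a.length ∧
      ∀ j, ((List.range m).foldl (stepA a) ([], List.replicate a.length 0)).2.getD j 0
            = ansVal a m j := by
  intro m
  induction m with
  | zero =>
    intro _
    refine ⟨by simp, by simp, fun j => ?_⟩
    have h1 : (List.replicate a.length (0 : Int)).getD j 0 = 0 := by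
      by_cases hj : j < a.length
      · exact List.getD_replicate _ hj
      · exact List.getD_eq_default _ _ (by simpa using not_lt.mp hj)
    simp only [List.range_zero, List.foldl_nil, h1]
    unfold ansVal
    simp
  | succ m ih =>
    intro hm
    obtain ⟨hstk, hlen, hans⟩ := ih (by omega)
    set st := (List.range m).foldl (stepA a) ([], List.replicate a.length 0) with hst
    rw [List.range_succ, List.foldl_append, List.foldl_cons, List.foldl_nil]
    -- facts about the old stack
    have hmem : ∀ j ∈ st.1, j < m ∧ keepB a m j = true := by
      intro j hj
      rw [hstk, List.mem_reverse, List.mem_filter, List.mem_range] at hj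
      exact hj
    have hpair : st.1.Pairwise (· > ·) := by
      rw [hstk, List.pairwise_reverse]
      exact List.Pairwise.filter _ List.pairwise_lt_range
    have hmono : ∀ j ∈ st.1, ∀ j' ∈ st.1, j' < j → a.getD j 0 ≤ a.getD j' 0 := by
      intro j hj j' hj' hlt
      obtain ⟨hjm, _⟩ := hmem j hj
      obtain ⟨hj'm, hk'⟩ := hmem j' hj'
      exact (keepB_iff a hj'm).mp hk' j hlt hjm
    have hinlen : ∀ j ∈ st.1, j < st.2.length := by
      intro j hj; rw [hlen]; exact lt_of_lt_of_le (hmem j hj).1 (by omega)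
    -- range' split used on both sides, for j < m
    have hsplit : ∀ j, j < m → List.range' (j + 1) (m + 1 - (j + 1))
        = List.range' (j + 1) (m - (j + 1)) ++ [m] := by
      intro j hj
      have h1 : m + 1 - (j + 1) = (m - (j + 1)) + 1 := by
        omega
      rw [h1, List.range'_concat]
      congr 2
      omega
    refine ⟨?_, ?_, ?_⟩
    · -- stack part
      show m :: (popLoop a (a.getD m 0) m st.1 st.2).1 = _
      rw [popLoop_stack a _ m st.1 st.2 hpair hmono]
      have hkm : keepB a (m + 1) m = true := by
        unfold keepB; simp
      rw [List.filter_append, List.filter_cons_of_pos hkm,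
        List.filter_nil, List.reverse_append, List.reverse_cons, List.reverse_nil,
        List.nil_append, List.cons_append, List.nil_append]
      congr 1
      rw [hstk, List.filter_reverse, List.filter_filter]
      congr 1
      apply List.filter_congr
      intro j hj
      rw [List.mem_range] at hj
      have heq : keepB a (m + 1) j = (keepB a m j && decide (a.getD m 0 ≤ a.getD j 0)) := by
        unfold keepB
        rw [hsplit j hj, List.all_append]
        simp
      rw [heq]
      by_cases h1 : keepB a m j = true
      · simp only [h1, Bool.true_and, Bool.and_true]
        rw [← decide_not]
        simp
      · simp [h1]
    · show (popLoop a (a.getD m 0) m st.1 st.2).2.length = _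
      rw [popLoop_len, hlen]
    · intro j
      show (popLoop a (a.getD m 0) m st.1 st.2).2.getD j 0 = _
      rw [popLoop_ans a _ m st.1 st.2 hpair hmono hinlen j]
      by_cases hc : j ∈ st.1 ∧ a.getD m 0 > a.getD j 0
      · rw [if_pos hc]
        obtain ⟨hjm, hkj⟩ := hmem j hc.1
        unfold ansVal
        rw [hsplit j hjm, List.find?_append]
        have hnone : (List.range' (j + 1) (m - (j + 1))).find?
            (fun k => decide (a.getD k 0 > a.getD j 0)) = none := by
          rw [List.find?_eq_none]
          intro k hk
          rw [List.mem_range'_1] at hk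
          have := (keepB_iff a hjm).mp hkj k (by omega) (by omega)
          simp only [decide_eq_true_eq, gt_iff_lt, not_lt]
          omega
        rw [hnone, Option.none_or, List.find?_cons_of_pos (by simpa using hc.2)]
      · rw [if_neg hc, hans j]
        unfold ansVal
        by_cases hjm : j < m
        · rw [hsplit j hjm, List.find?_append]
          by_cases hk : keepB a m j = true
          · have hjs : j ∈ st.1 := by
              rw [hstk, List.mem_reverse, List.mem_filter, List.mem_range]
              exact ⟨hjm, hk⟩
            have hnt : ¬ a.getD m 0 > a.getD j 0 := fun h => hc ⟨hjs, h⟩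
            have hnone : (List.range' (j + 1) (m - (j + 1))).find?
                (fun k => decide (a.getD k 0 > a.getD j 0)) = none := by
              rw [List.find?_eq_none]
              intro k hkk
              rw [List.mem_range'_1] at hkk
              have := (keepB_iff a hjm).mp hk k (by omega) (by omega)
              simp only [decide_eq_true_eq, gt_iff_lt, not_lt]
              omega
            rw [hnone, Option.none_or, List.find?_cons_of_neg (by simpa using hnt),
              List.find?_nil]
          · -- some earlier k already answered j: find? on the prefix is some
            rcases hfind : (List.range' (j + 1) (m - (j + 1))).find?
                (fun k => decide (a.getD k 0 > a.getD j 0)) with _ | k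
            · exfalso
              apply hk
              rw [List.find?_eq_none] at hfind
              unfold keepB
              rw [List.all_eq_true]
              intro k hkk
              have := hfind k hkk
              simp only [decide_eq_true_eq, gt_iff_lt, not_lt] at this ⊢
              omega
            · rw [Option.some_or]
        · -- j ≥ m: both ranges are empty
          have h1 : m + 1 - (j + 1) = 0 := by omega
          have h2 : m - (j + 1) = 0 := by omega
          rw [h1, h2]

-- B's scan equals the find?-characterisation
theorem firstGapAux_eq (a : List Int) (i : Nat) :
    ∀ l : List Nat, firstGapAux a i l
      = match l.find? (fun k => decide (a.getD k 0 > a.getD i 0)) with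
        | some k => (k : Int) - (i : Int)
        | none => 0 := by
  intro l
  induction l with
  | nil => simp [firstGapAux]
  | cons j js ih =>
    simp only [firstGapAux]
    by_cases h : a.getD j 0 > a.getD i 0
    · rw [if_pos h, List.find?_cons_of_pos (by simpa using h)]
    · rw [if_neg h, List.find?_cons_of_neg (by simpa using h), ih]

-- ===== VERDICT (by name: the statement is the Claim_ definition above) =====
theorem time_to_complete_dream_designs_spec : Claim_equal_time_to_complete_dream_designs := by
  intro a _
  show time_to_complete_dream_designs a = time_to_complete_dream_designs_alt a
  obtain ⟨_, hlen, hans⟩ := mainInv a a.length le_rfl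
  unfold time_to_complete_dream_designs time_to_complete_dream_designs_alt
  apply List.ext_getElem
  · simpa using hlen
  · intro i h1 h2
    rw [List.getElem_map, List.getElem_range]
    rw [← List.getD_eq_getElem _ 0 h1, hans i, firstGapAux_eq]
    unfold ansVal
    rfl
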